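-- pv_equiv track=rewrite | github.com/jixunmoe/aoc-solutions | aoc-2025/day-01/solve.py | solve_p1
-- ===== SOURCE A (Python) =====
-- def solve_p1(text: str):
--     count = 0
--     location = 50
--     for line in text.splitlines():
--         direction = -1 if line[0] == "L" else 1
--         distance = direction * int(line[1:])
--         location = (location + distance) % 100
--         if location == 0:
--             count += 1
--     return count
-- ===== SOURCE B (Python) =====
-- def solve_p1(text: str):
--     def one(line, offset):
--         d = (-1 if line[0] == "L" else 1) * int(line[1:])
--         return ((1 if (offset + d) % 100 == 0 else 0), d)
--
--     def go(lines, offset):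
--         # returns (number of prefix positions whose absolute position
--         #  offset+prefix-sum is ≡ 0 mod 100, total signed distance)
--         n = len(lines)
--         if n == 0:
--             return (0, 0)
--         if n == 1:
--             return one(lines[0], offset)
--         mid = n // 2
--         c1, s1 = go(lines[:mid], offset)
--         c2, s2 = go(lines[mid:], offset + s1)
--         return (c1 + c2, s1 + s2)
--
--     return go(text.splitlines(), 50)[0]
-- ===== Notes on version B (the rewrite author's own statement) =====
-- stated objective: alternative
-- what changed: Replaces A's sequential fused loop (running location reduced mod 100, counting inline) by a recursive divide-and-conquer: split the line list in half, solve each half returning (hit count, total signed distance), combine by offsetting the right half with the left half's unreduced total; correct because the mod-100 zero test is invariant under reducing the offset once at the end.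
import Mathlib
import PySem

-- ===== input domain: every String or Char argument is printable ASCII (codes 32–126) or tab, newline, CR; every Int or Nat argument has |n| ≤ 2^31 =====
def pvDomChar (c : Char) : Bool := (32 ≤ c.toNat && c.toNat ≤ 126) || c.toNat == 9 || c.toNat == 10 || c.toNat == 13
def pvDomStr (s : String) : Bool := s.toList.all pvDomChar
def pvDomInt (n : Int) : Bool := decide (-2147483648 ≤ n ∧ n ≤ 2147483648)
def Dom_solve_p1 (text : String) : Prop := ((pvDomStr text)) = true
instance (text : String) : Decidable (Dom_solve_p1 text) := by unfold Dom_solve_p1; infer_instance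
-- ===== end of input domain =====

-- B replaces A's sequential fused mod-100 loop by a recursive divide-and-conquer over the
-- line list (each half returns (hit count, total signed distance)); alternative decomposition.

-- ===== PORT A =====
-- one loop iteration of A; Option state: none = an exception already occurred
def solve_p1_stepA (st : Option (Int × Int)) (line : String) : Option (Int × Int) :=
  match st with
  | none => none
  | some (count, location) =>
    match PySem.Str.pyGet? line 0 with
    | none => none  -- IndexError: line[0] on empty line
    | some c =>
      let direction : Int := if c = 'L' then -1 else 1
      match PySem.Int.ofStr? (PySem.Str.slice line (some 1) none) with
      | none => none  -- ValueError: int(line[1:])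
      | some n =>
        let distance := direction * n
        let location' := PySem.Int.mod (location + distance) 100
        some (if location' = 0 then count + 1 else count, location')

def solve_p1 (text : String) : Int :=
  ((((PySem.Str.splitlines text).foldl solve_p1_stepA (some (0, 50))).map Prod.fst).getD 0)

-- ===== PORT B =====
-- leaf of Source B's divide-and-conquer: handle one line
def solve_p1_lineB (line : String) (offset : Int) : Option (Int × Int) :=
  match PySem.Str.pyGet? line 0 with
  | none => none  -- IndexError: line[0]
  | some c =>
    match PySem.Int.ofStr? (PySem.Str.slice line (some 1) none) with
    | none => none  -- ValueError: int(line[1:])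
    | some n =>
      let d := (if c = 'L' then (-1 : Int) else 1) * n
      some ((if PySem.Int.mod (offset + d) 100 = 0 then 1 else 0), d)

-- recursive divide-and-conquer helper `go` of Source B; none = an exception occurred
def solve_p1_goB (lines : List String) (offset : Int) : Option (Int × Int) :=
  if lines.length = 0 then some (0, 0)
  else if lines.length = 1 then
    match PySem.List.pyGet? lines 0 with
    | none => none
    | some line => solve_p1_lineB line offset
  else
    let mid := lines.length / 2
    match solve_p1_goB (PySem.List.slice lines none (some (mid : Int))) offset with
    | none => none
    | some (c1, s1) =>
      match solve_p1_goB (PySem.List.slice lines (some (mid : Int)) none) (offset + s1) with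
      | none => none
      | some (c2, s2) => some (c1 + c2, s1 + s2)
termination_by lines.length
decreasing_by
  · simp only [PySem.List.slice_to_natCast, List.length_take]; omega
  · simp only [PySem.List.slice_from_natCast, List.length_drop]; omega

def solve_p1_alt (text : String) : Int :=
  (((solve_p1_goB (PySem.Str.splitlines text) 50).map Prod.fst).getD 0)

-- ===== PRECONDITION & SPEC =====
-- Pre_ excludes exactly the inputs on which A raises: an empty line (IndexError on line[0])
-- or a line whose tail is not a valid int literal (ValueError in int(line[1:])).
def Pre_solve_p1 (text : String) : Prop :=
  ∀ line ∈ PySem.Str.splitlines text,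
    line.toList ≠ [] ∧ (PySem.Int.ofStr? (PySem.Str.slice line (some 1) none)).isSome = true
instance (text : String) : Decidable (Pre_solve_p1 text) := by unfold Pre_solve_p1; infer_instance

def pvWitness_solve_p1 : String := "R50\nL100\nR3"

def Spec_solve_p1 (text : String) (out : Int) : Prop := out = solve_p1_alt text
instance (text : String) (out : Int) : Decidable (Spec_solve_p1 text out) := by unfold Spec_solve_p1; infer_instance

-- ===== CLAIM =====
def Claim_equal_solve_p1 : Prop :=
  ∀ (text : String), Dom_solve_p1 text → Pre_solve_p1 text → Spec_solve_p1 text (solve_p1 text)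

-- ===== LEMMAS AND PROOFS =====

-- proof-only helpers: parsed signed distance of one line / of all lines
def parseLine? (line : String) : Option Int :=
  match PySem.Str.pyGet? line 0 with
  | none => none
  | some c =>
    (PySem.Int.ofStr? (PySem.Str.slice line (some 1) none)).map
      (fun n => (if c = 'L' then (-1 : Int) else 1) * n)

def parseAll? : List String → Option (List Int)
  | [] => some []
  | l :: ls =>
    match parseLine? l, parseAll? ls with
    | some d, some ds => some (d :: ds)
    | _, _ => none

-- reference count: prefix sums (from accumulator `offset`) that are ≡ 0 mod 100
def specCount (offset : Int) : List Int → Int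
  | [] => 0
  | d :: ds => (if PySem.Int.mod (offset + d) 100 = 0 then 1 else 0) + specCount (offset + d) ds

lemma parseLine?_isSome (line : String) (hne : line.toList ≠ [])
    (h2 : (PySem.Int.ofStr? (PySem.Str.slice line (some 1) none)).isSome = true) :
    (parseLine? line).isSome = true := by
  unfold parseLine?
  cases hl : line.toList with
  | nil => exact absurd hl hne
  | cons c cs =>
    simp only [PySem.Str.pyGet?_eq, hl, PySem.Chars.pyGet?_eq_listPyGet?,
      PySem.List.pyGet?_zero_cons]
    cases ho : PySem.Int.ofStr? (PySem.Str.slice line (some 1) none) with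
    | none => rw [ho] at h2; simp at h2
    | some n => simp

lemma parseAll?_isSome (lines : List String)
    (h : ∀ l ∈ lines, (parseLine? l).isSome = true) :
    ∃ ds, parseAll? lines = some ds := by
  induction lines with
  | nil => exact ⟨[], rfl⟩
  | cons l ls ih =>
    obtain ⟨ds, hds⟩ := ih (fun x hx => h x (List.mem_cons_of_mem _ hx))
    have hl := h l (List.mem_cons_self ..)
    cases hp : parseLine? l with
    | none => rw [hp] at hl; simp at hl
    | some d => exact ⟨d :: ds, by simp only [parseAll?, hp, hds]⟩

lemma mod_shift (t d : Int) :
    PySem.Int.mod (PySem.Int.mod t 100 + d) 100 = PySem.Int.mod (t + d) 100 := by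
  have h : ∀ a : Int, a.fmod 100 = a % 100 := by
    intro a; rw [Int.fmod_eq_emod]; simp
  simp only [PySem.Int.mod, h]
  omega

-- A's fold computes specCount (with the location reduced mod 100 at each step)
lemma foldA_spec (lines : List String) (ds : List Int) (hds : parseAll? lines = some ds)
    (c offset : Int) :
    lines.foldl solve_p1_stepA (some (c, PySem.Int.mod offset 100)) =
      some (c + specCount offset ds, PySem.Int.mod (offset + ds.sum) 100) := by
  induction lines generalizing ds c offset with
  | nil =>
    simp only [parseAll?] at hds
    cases hds
    simp [specCount]
  | cons l ls ih =>
    simp only [parseAll?] at hds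
    cases hp : parseLine? l with
    | none => rw [hp] at hds; simp at hds
    | some d =>
      rw [hp] at hds
      cases hq : parseAll? ls with
      | none => rw [hq] at hds; simp at hds
      | some ds' =>
        rw [hq] at hds
        simp only [Option.some.injEq] at hds
        subst hds
        unfold parseLine? at hp
        cases hg : PySem.Str.pyGet? l 0 with
        | none => rw [hg] at hp; simp at hp
        | some ch =>
          rw [hg] at hp
          cases ho : PySem.Int.ofStr? (PySem.Str.slice l (some 1) none) with
          | none => rw [ho] at hp; simp at hp
          | some n =>
            rw [ho] at hp
            simp only [Option.map_some, Option.some.injEq] at hp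
            simp only [List.foldl_cons, solve_p1_stepA, hg, ho]
            rw [show (if ch = 'L' then (-1 : Int) else 1) * n = d from hp]
            rw [mod_shift offset d]
            rw [ih ds' hq _ (offset + d)]
            simp only [specCount, List.sum_cons]
            split_ifs with h0 <;>
              simp only [Option.some.injEq, Prod.mk.injEq] <;>
              constructor <;> ring_nf

lemma parseAll?_append (xs ys : List String) :
    parseAll? (xs ++ ys) =
      (parseAll? xs).bind (fun a => (parseAll? ys).map (fun b => a ++ b)) := by
  induction xs with
  | nil =>
    simp only [List.nil_append, parseAll?, Option.bind_some]
    cases parseAll? ys <;> simp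
  | cons l ls ih =>
    simp only [List.cons_append, parseAll?.eq_2, ih]
    cases parseLine? l with
    | none => simp
    | some d =>
      cases parseAll? ls with
      | none => simp
      | some a =>
        cases parseAll? ys <;> simp

lemma specCount_append (offset : Int) (ds1 ds2 : List Int) :
    specCount offset (ds1 ++ ds2) =
      specCount offset ds1 + specCount (offset + ds1.sum) ds2 := by
  induction ds1 generalizing offset with
  | nil => simp [specCount]
  | cons d ds ih =>
    simp only [List.cons_append, specCount, ih, List.sum_cons]
    ring_nf

-- B's divide-and-conquer computes specCount and the total distance
lemma goB_spec (N : Nat) : ∀ (lines : List String), lines.length ≤ N →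
    ∀ (offset : Int) (ds : List Int), parseAll? lines = some ds →
    solve_p1_goB lines offset = some (specCount offset ds, ds.sum) := by
  induction N with
  | zero =>
    intro lines hlen offset ds hds
    have : lines = [] := List.eq_nil_of_length_eq_zero (Nat.le_zero.mp hlen)
    subst this
    simp only [parseAll?, Option.some.injEq] at hds
    subst hds
    rw [solve_p1_goB]
    simp [specCount]
  | succ N ih =>
    intro lines hlen offset ds hds
    rw [solve_p1_goB]
    by_cases h0 : lines.length = 0
    · have : lines = [] := List.eq_nil_of_length_eq_zero h0
      subst this
      simp only [parseAll?, Option.some.injEq] at hds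
      subst hds
      simp [specCount]
    · by_cases h1 : lines.length = 1
      · obtain ⟨l, hl⟩ : ∃ l, lines = [l] := by
          cases lines with
          | nil => simp at h0
          | cons a t =>
            cases t with
            | nil => exact ⟨a, rfl⟩
            | cons b u => simp at h1
        subst hl
        rw [if_neg h0, if_pos h1]
        simp only [PySem.List.pyGet?_zero_cons]
        unfold solve_p1_lineB
        simp only [parseAll?, parseLine?] at hds
        simp only [PySem.Str.pyGet?_eq, PySem.Chars.pyGet?_eq_listPyGet?] at hds ⊢
        cases hg : PySem.List.pyGet? l.toList 0 with
        | none => rw [hg] at hds; simp at hds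
        | some ch =>
          rw [hg] at hds
          cases ho : PySem.Int.ofStr? (PySem.Str.slice l (some 1) none) with
          | none => rw [ho] at hds; simp at hds
          | some n =>
            rw [ho] at hds
            simp only [Option.map_some, Option.some.injEq] at hds
            subst hds
            simp [specCount]
      · have hge2 : 2 ≤ lines.length := by omega
        simp only [if_neg h0, if_neg h1]
        set mid := lines.length / 2 with hmid
        have hsplit : lines = lines.take mid ++ lines.drop mid :=
          (List.take_append_drop mid lines).symm
        rw [hsplit, parseAll?_append] at hds
        cases hA : parseAll? (lines.take mid) with
        | none => rw [hA] at hds; simp at hds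
        | some ds1 =>
          rw [hA] at hds
          cases hB : parseAll? (lines.drop mid) with
          | none => rw [hB] at hds; simp at hds
          | some ds2 =>
            rw [hB] at hds
            simp only [Option.bind_some, Option.map_some, Option.some.injEq] at hds
            subst hds
            have hlt1 : (lines.take mid).length ≤ N := by
              simp only [List.length_take]; omega
            have hlt2 : (lines.drop mid).length ≤ N := by
              simp only [List.length_drop]; omega
            rw [PySem.List.slice_to_natCast, PySem.List.slice_from_natCast]
            simp only [ih _ hlt1 offset ds1 hA, ih _ hlt2 (offset + ds1.sum) ds2 hB]
            simp [specCount_append]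

-- ===== VERDICT =====
theorem solve_p1_spec : Claim_equal_solve_p1 := by
  intro text _ hpre
  have hall : ∀ l ∈ PySem.Str.splitlines text, (parseLine? l).isSome = true := by
    intro l hl
    obtain ⟨h1, h2⟩ := hpre l hl
    exact parseLine?_isSome l h1 h2
  obtain ⟨ds, hds⟩ := parseAll?_isSome _ hall
  show solve_p1 text = solve_p1_alt text
  unfold solve_p1 solve_p1_alt
  rw [show (some ((0 : Int), (50 : Int))) = some ((0 : Int), PySem.Int.mod 50 100) from by decide]
  rw [foldA_spec _ ds hds 0 50]
  rw [goB_spec (PySem.Str.splitlines text).length _ le_rfl 50 ds hds]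
  simp
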